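-- pv_equiv track=rewrite | github.com/crasherbe/V2-lottery-generator | predictor.py | top_predictions
-- ===== SOURCE A (Python) =====
-- from collections import Counter
--
-- def top_predictions(numbers):
--
--     digit_list = []
--
--     for num in numbers:
--         for d in num:
--             digit_list.append(d)
--
--     counter = Counter(digit_list)
--
--     strongest_digits = [x[0] for x in counter.most_common(5)]
--
--     scored = []
--
--     for num in numbers:
--
--         score = 0
--
--         for d in num:
--             if d in strongest_digits:
--                 score += 1
--
--         scored.append((num, score))
--
--     scored.sort(key=lambda x: x[1], reverse=True)
--
--     top10 = [x[0] for x in scored[:10]]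
--
--     return top10
-- ===== SOURCE B (Python) =====
-- from collections import Counter
--
-- def top_predictions(numbers):
--     counter = Counter(d for num in numbers for d in num)
--
--     strongest_digits = [x[0] for x in counter.most_common(5)]
--
--     # bucket the numbers by score instead of sorting them
--     buckets = {}
--     for num in numbers:
--         score = len([d for d in num if d in strongest_digits])
--         buckets.setdefault(score, []).append(num)
--
--     result = []
--     for s in sorted(buckets, reverse=True):
--         result.extend(buckets[s])
--
--     return result[:10]
-- ===== Notes on version B (the rewrite author's own statement) =====
-- stated objective: alternative
-- what changed: B replaces A's stable reverse comparison-sort of the (number, score) list by bucketing the numbers per score in a dict and emitting buckets from the highest score down (a counting/bucket sort over the small distinct-score set).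
import Mathlib
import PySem

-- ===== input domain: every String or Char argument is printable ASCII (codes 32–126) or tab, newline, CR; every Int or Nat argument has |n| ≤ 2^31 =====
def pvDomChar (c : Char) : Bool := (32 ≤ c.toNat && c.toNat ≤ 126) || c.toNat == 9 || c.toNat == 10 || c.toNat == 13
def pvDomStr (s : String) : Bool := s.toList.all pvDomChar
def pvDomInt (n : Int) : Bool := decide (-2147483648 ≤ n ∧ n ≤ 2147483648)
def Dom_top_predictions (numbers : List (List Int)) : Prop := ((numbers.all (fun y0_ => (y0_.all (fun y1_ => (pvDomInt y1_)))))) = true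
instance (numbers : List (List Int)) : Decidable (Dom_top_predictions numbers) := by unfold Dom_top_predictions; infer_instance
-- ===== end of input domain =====

-- B replaces A's stable reverse sort of the scored list by bucketing the numbers per score
-- and emitting the buckets from the highest score down (a counting/bucket sort over the
-- scores); objective: alternative. A is total, so there is no Pre_.

-- ===== PORT A =====
def top_predictions (numbers : List (List Int)) : List (List Int) :=
  let digit_list : List Int :=
    numbers.foldl (fun acc num => num.foldl (fun acc2 d => acc2 ++ [d]) acc) []
  let counter : PySem.Dict Int Int := PySem.Dict.counter digit_list
  let strongest_digits : List Int :=
    ((PySem.List.sorted counter.items (fun x => x.2) true).take 5).map (fun x => x.1)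
  let scored : List (List Int × Int) :=
    numbers.foldl (fun acc num =>
      acc ++ [(num, num.foldl (fun score d =>
        if strongest_digits.contains d then score + 1 else score) (0 : Int))]) []
  let sortedScored := PySem.List.sorted scored (fun x => x.2) true
  (PySem.List.slice sortedScored none (some 10)).map (fun x => x.1)

-- ===== PORT B =====
def top_predictions_alt (numbers : List (List Int)) : List (List Int) :=
  let counter : PySem.Dict Int Int := PySem.Dict.counter (numbers.flatMap (fun num => num))
  let strongest_digits : List Int :=
    ((PySem.List.sorted counter.items (fun x => x.2) true).take 5).map (fun x => x.1)
  let buckets : PySem.Dict Int (List (List Int)) :=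
    numbers.foldl (fun b num =>
      b.modify ((num.filter (fun d => strongest_digits.contains d)).length : Int) []
        (fun l => l ++ [num])) PySem.Dict.empty
  let result : List (List Int) :=
    (PySem.List.sorted buckets.keys (fun s => s) true).foldl
      (fun acc s => acc ++ buckets.getD s []) []
  PySem.List.slice result none (some 10)


-- ===== PRECONDITION & SPEC =====
def Spec_top_predictions (numbers : List (List Int)) (out : List (List Int)) : Prop := out = top_predictions_alt numbers
instance (numbers : List (List Int)) (out : List (List Int)) : Decidable (Spec_top_predictions numbers out) := by unfold Spec_top_predictions; infer_instance

-- ===== CLAIM (what is proved, stated in full; the proofs are below) =====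
def Claim_equal_top_predictions : Prop := ∀ (numbers : List (List Int)), Dom_top_predictions numbers → Spec_top_predictions numbers (top_predictions numbers)

-- ===== LEMMAS AND PROOFS =====

theorem insertBy_append_of_not_before {α : Type} (bef : α → α → Bool) (x : α)
    (u v : List α) (h : ∀ a ∈ u, bef x a = false) :
    PySem.List.insertBy bef x (u ++ v) = u ++ PySem.List.insertBy bef x v := by
  induction u with
  | nil => simp
  | cons a u ih =>
    have ha := h a (by simp)
    simp only [List.cons_append, PySem.List.insertBy, ha]
    simp only [Bool.false_eq_true, if_false]
    rw [ih (fun b hb => h b (by simp [hb]))]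

theorem insertBy_all_before {α : Type} (bef : α → α → Bool) (x : α)
    (v : List α) (h : ∀ a ∈ v, bef x a = true) :
    PySem.List.insertBy bef x v = x :: v := by
  cases v with
  | nil => rfl
  | cons a v => simp [PySem.List.insertBy, h a (by simp)]


theorem insertBy_flatMap_mem {α : Type} (key : α → Int) (x : α) (ks : List Int)
    (g : Int → List α) (hdesc : ks.Pairwise (fun a b => b < a)) (hmem : key x ∈ ks)
    (hg : ∀ s ∈ ks, ∀ a ∈ g s, key a = s) :
    PySem.List.insertBy (fun a b => decide (key b < key a)) x (ks.flatMap g)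
      = ks.flatMap (fun s => if s = key x then g s ++ [x] else g s) := by
  induction ks with
  | nil => simp at hmem
  | cons s rest ih =>
    rw [List.pairwise_cons] at hdesc
    obtain ⟨hlt, hrest⟩ := hdesc
    by_cases hs : s = key x
    · rw [List.flatMap_cons]
      rw [insertBy_append_of_not_before _ _ _ _
        (fun a ha => by simp [hg s (by simp) a ha, hs])]
      rw [insertBy_all_before _ _ _
        (fun a ha => by
          rw [List.mem_flatMap] at ha
          obtain ⟨t, ht, hat⟩ := ha
          have h1 := hg t (by simp [ht]) a hat
          have h2 := hlt t ht
          simp [h1]; omega)]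
      rw [List.flatMap_cons, if_pos hs]
      have hcong : List.flatMap (fun t => if t = key x then g t ++ [x] else g t) rest
          = List.flatMap g rest := by
        refine List.flatMap_congr (fun t ht => ?_)
        have : t ≠ key x := by have := hlt t ht; omega
        simp [this]
      rw [hcong]
      simp
    · have hmem' : key x ∈ rest := by
        rcases List.mem_cons.mp hmem with h | h
        · exact absurd h.symm hs
        · exact h
      have hkx : key x < s := hlt _ hmem'
      rw [List.flatMap_cons]
      rw [insertBy_append_of_not_before _ _ _ _
        (fun a ha => by
          have := hg s (by simp) a ha
          simp [this]; omega)]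
      rw [ih hrest hmem' (fun t ht a ha => hg t (by simp [ht]) a ha)]
      rw [List.flatMap_cons, if_neg hs]

theorem insertBy_flatMap_new {α : Type} (key : α → Int) (x : α) (ks : List Int)
    (g : Int → List α) (hnot : key x ∉ ks)
    (hg : ∀ s ∈ ks, ∀ a ∈ g s, key a = s) (hne : ∀ s ∈ ks, g s ≠ []) :
    PySem.List.insertBy (fun a b => decide (key b < key a)) x (ks.flatMap g)
      = (PySem.List.insertBy (fun a b => decide (b < a)) (key x) ks).flatMap
          (fun s => if s = key x then [x] else g s) := by
  induction ks with
  | nil => simp [PySem.List.insertBy]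
  | cons s rest ih =>
    have hsne : s ≠ key x := fun h => hnot (by simp [h])
    have hnot' : key x ∉ rest := fun h => hnot (by simp [h])
    have hcong : List.flatMap (fun t => if t = key x then [x] else g t) rest
        = List.flatMap g rest := by
      refine List.flatMap_congr (fun t ht => ?_)
      have : t ≠ key x := fun h => hnot' (h ▸ ht)
      simp [this]
    by_cases hlt : s < key x
    · obtain ⟨a, gs', hgs⟩ : ∃ a gs', g s = a :: gs' := by
        cases h : g s with
        | nil => exact absurd h (hne s (by simp))
        | cons a t => exact ⟨a, t, rfl⟩
      have hka : key a = s := hg s (by simp) a (by simp [hgs])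
      rw [List.flatMap_cons, hgs]
      have hshape : (a :: gs') ++ rest.flatMap g = a :: (gs' ++ rest.flatMap g) := by simp
      rw [hshape]
      simp only [PySem.List.insertBy]
      rw [if_pos (by simp [hka, hlt]), if_pos (by simp [hlt])]
      rw [List.flatMap_cons, if_pos rfl, List.flatMap_cons, if_neg hsne, hcong]
      simp [hgs]
    · rw [List.flatMap_cons]
      rw [insertBy_append_of_not_before _ _ _ _
        (fun a ha => by
          have := hg s (by simp) a ha
          simp [this]; omega)]
      rw [ih hnot' (fun t ht a ha => hg t (by simp [ht]) a ha)
        (fun t ht => hne t (by simp [ht]))]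
      simp only [PySem.List.insertBy]
      rw [if_neg (by simp [hlt])]
      rw [List.flatMap_cons, if_neg hsne]

def descKeys (xs : List Int) : List Int :=
  PySem.List.sorted (PySem.Set.ofList xs) (fun s => s) true

theorem descKeys_pairwise (l : List Int) : (descKeys l).Pairwise (fun a b => b < a) := by
  have hge := PySem.List.sorted_pairwise_rev (PySem.Set.ofList l) (fun s => s)
  have hnd : (descKeys l).Nodup :=
    (PySem.List.sorted_perm (PySem.Set.ofList l) (fun s => s) true).symm.nodup
      (PySem.Set.nodup_ofList l)
  exact (hge.and hnd).imp (fun {a b} h => by obtain ⟨h1, h2⟩ := h; omega)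

theorem mem_descKeys (l : List Int) (s : Int) : s ∈ descKeys l ↔ s ∈ l := by
  unfold descKeys
  rw [PySem.List.mem_sorted, PySem.Set.mem_ofList]

theorem ofList_append_singleton (l : List Int) (k : Int) :
    PySem.Set.ofList (l ++ [k]) = PySem.Set.add (PySem.Set.ofList l) k := by
  rw [PySem.Set.ofList_eq_foldl, PySem.Set.ofList_eq_foldl, List.foldl_append]
  rfl

theorem descKeys_append_mem (l : List Int) (k : Int) (h : k ∈ l) :
    descKeys (l ++ [k]) = descKeys l := by
  unfold descKeys
  rw [ofList_append_singleton]
  have : PySem.Set.add (PySem.Set.ofList l) k = PySem.Set.ofList l := by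
    unfold PySem.Set.add
    rw [if_pos]
    rw [PySem.Set.contains_eq_decide]  -- guess
    simpa using h
  rw [this]

theorem descKeys_append_new (l : List Int) (k : Int) (h : k ∉ l) :
    descKeys (l ++ [k]) = PySem.List.insertBy (fun a b => decide (b < a)) k (descKeys l) := by
  unfold descKeys
  rw [ofList_append_singleton]
  have : PySem.Set.add (PySem.Set.ofList l) k = PySem.Set.ofList l ++ [k] := by
    unfold PySem.Set.add
    rw [if_neg]
    rw [PySem.Set.contains_eq_decide]
    simpa using h
  rw [this, PySem.List.sorted_rev_eq_foldl_insertBy, PySem.List.sorted_rev_eq_foldl_insertBy,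
    List.foldl_append]
  rfl
theorem sorted_rev_eq_groups {α : Type} (xs : List α) (key : α → Int) :
    PySem.List.sorted xs key true
      = (descKeys (xs.map key)).flatMap (fun s => xs.filter (fun a => key a == s)) := by
  induction xs using List.reverseRecOn with
  | nil => simp [descKeys, PySem.List.sorted, PySem.Set.ofList]
  | append_singleton ys x ih =>
    have hstep : PySem.List.sorted (ys ++ [x]) key true
        = PySem.List.insertBy (fun a b => decide (key b < key a)) x
            (PySem.List.sorted ys key true) := by
      rw [PySem.List.sorted_rev_eq_foldl_insertBy (ys ++ [x]),
        PySem.List.sorted_rev_eq_foldl_insertBy ys, List.foldl_append]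
      rfl
    have hg : ∀ s ∈ descKeys (ys.map key), ∀ a ∈ ys.filter (fun a => key a == s), key a = s :=
      fun s _ a ha => by simpa using (List.of_mem_filter ha)
    have hfilter : ∀ s : Int, (ys ++ [x]).filter (fun a => key a == s)
        = ys.filter (fun a => key a == s) ++ (if key x = s then [x] else []) := by
      intro s
      rw [List.filter_append]
      congr 1
      by_cases h : key x = s <;> simp [h]
    rw [hstep, ih, List.map_append, List.map_cons, List.map_nil]
    by_cases hmem : key x ∈ ys.map key
    · rw [insertBy_flatMap_mem key x _ _ (descKeys_pairwise _)
        ((mem_descKeys _ _).mpr hmem) hg]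
      rw [descKeys_append_mem _ _ hmem]
      refine List.flatMap_congr (fun s hs => ?_)
      rw [hfilter s]
      by_cases h : s = key x
      · rw [if_pos h, if_pos h.symm]
      · rw [if_neg h, if_neg (fun hh => h hh.symm)]
        simp
    · have hne : ∀ s ∈ descKeys (ys.map key), ys.filter (fun a => key a == s) ≠ [] := by
        intro s hs
        have : s ∈ ys.map key := (mem_descKeys _ _).mp hs
        obtain ⟨a, ha, hka⟩ := List.mem_map.mp this
        intro hemp
        have : a ∈ ys.filter (fun a => key a == s) := List.mem_filter.mpr ⟨ha, by simp [hka]⟩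
        simp [hemp] at this
      rw [insertBy_flatMap_new key x _ _
        (fun h => hmem ((mem_descKeys _ _).mp h)) hg hne]
      rw [descKeys_append_new _ _ hmem]
      refine List.flatMap_congr (fun s hs => ?_)
      rw [hfilter s]
      by_cases h : s = key x
      · rw [if_pos h, if_pos h.symm]
        subst h
        have : ys.filter (fun a => key a == key x) = [] := by
          rw [List.filter_eq_nil_iff]
          intro a ha
          simp only [beq_iff_eq]
          intro hk
          exact hmem (List.mem_map.mpr ⟨a, ha, hk⟩)
        rw [this]
        rfl
      · rw [if_neg h, if_neg (fun hh => h hh.symm)]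
        simp

theorem ports_eq (numbers : List (List Int)) :
    top_predictions numbers = top_predictions_alt numbers := by
  simp only [top_predictions, top_predictions_alt]
  -- A's digit_list loop is the flattened list B counts
  have hdl : (numbers.foldl (fun acc num => num.foldl (fun acc2 d => acc2 ++ [d]) acc)
      ([] : List Int)) = numbers.flatMap (fun num => num) := by
    have h1 : (fun (acc : List Int) (num : List Int) =>
        num.foldl (fun acc2 d => acc2 ++ [d]) acc) = fun acc num => acc ++ num := by
      funext acc num
      exact PySem.List.foldl_append_singleton_eq_self num acc
    rw [h1, PySem.List.foldl_append_eq_flatMap (fun num => num)]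
    simp
  rw [hdl]
  set st : List Int :=
    ((PySem.List.sorted (PySem.Dict.counter (numbers.flatMap fun num => num)).items
      (fun x => x.2) true).take 5).map (fun x => x.1) with hst
  set f : List Int → Int :=
    fun num => ((num.countP (fun d => st.contains d) : Nat) : Int) with hf
  -- A's scored loop builds the decorated map
  have hsc : (fun (acc : List (List Int × Int)) (num : List Int) =>
      acc ++ [(num, num.foldl (fun score d =>
        if st.contains d then score + 1 else score) (0 : Int))])
      = fun acc num => acc ++ [(num, f num)] := by
    funext acc num
    rw [PySem.List.foldl_if_add_one]
    have hc : (fun d => st.contains d) = (fun d => decide (d ∈ st)) := by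
      funext d; simp
    simp [hf, hc]
  rw [hsc]
  rw [PySem.List.foldl_append_singleton_eq_map (f := fun num => (num, f num))]
  rw [List.nil_append]
  rw [sorted_rev_eq_groups (numbers.map (fun num => (num, f num))) (fun x => x.2)]
  -- B: scores in the bucket loop are the same f
  have hscB : (fun (b : PySem.Dict Int (List (List Int))) (num : List Int) =>
      b.modify (((num.filter (fun d => st.contains d)).length : Nat) : Int) []
        (fun l => l ++ [num]))
      = fun b num => b.modify (f num) [] (fun l => l ++ [num]) := by
    funext b num
    rw [hf]
    simp [List.countP_eq_length_filter]
  rw [hscB]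
  -- B's bucket keys are the distinct scores
  rw [PySem.Dict.keys_foldl_modify_key numbers f ([] : List (List Int))
    (fun _ num => fun l => l ++ [num]) PySem.Dict.empty]
  have hupd : PySem.Set.update (PySem.Dict.empty : PySem.Dict Int (List (List Int))).keys
      (numbers.map f) = PySem.Set.ofList (numbers.map f) := rfl
  rw [hupd]
  have hdk : PySem.List.sorted (PySem.Set.ofList (numbers.map f)) (fun s => s) true
      = descKeys (numbers.map f) := rfl
  rw [hdk]
  -- B's buckets: each bucket is the filter of the numbers with that score
  have hgetD : ∀ c : Int,
      (numbers.foldl (fun b num => b.modify (f num) [] (fun l => l ++ [num]))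
        PySem.Dict.empty).getD c []
      = numbers.filter (fun n => f n == c) := by
    intro c
    have hmapfold : numbers.foldl (fun b num => b.modify (f num) [] (fun l => l ++ [num]))
        PySem.Dict.empty
        = (numbers.map (fun num => ((f num, num) : Int × List Int))).foldl
            (fun b p => b.modify p.1 [] (fun l => l ++ [p.2])) PySem.Dict.empty := by
      rw [List.foldl_map]
    rw [hmapfold, PySem.Dict.getD_foldl_modify_append]
    simp [List.filter_map, Function.comp_def]
  rw [PySem.List.foldl_append_eq_flatMap]
  simp only [hgetD, List.nil_append]
  rw [(show (10 : Int) = ((10 : Nat) : Int) by norm_num)]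
  rw [PySem.List.slice_to_natCast, PySem.List.slice_to_natCast]
  rw [List.map_take, List.map_flatMap]
  simp only [List.filter_map, List.map_map, Function.comp_def]
  simp

-- ===== VERDICT (by name: the statement is the Claim_ definition above) =====
theorem top_predictions_spec : Claim_equal_top_predictions := by
  intro numbers _
  unfold Spec_top_predictions
  exact ports_eq numbers
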